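-- pv_equiv track=rewrite | github.com/nikiitin/RING-5 | src/core/services/data_services/pattern_index_service.py | extract_index_positions
-- ===== SOURCE A (Python) =====
-- from typing import Dict, List
--
-- def extract_index_positions(var_name: str) -> List[str]:
--     r"""
--     Extract position labels from pattern variable name.
--
--     Finds all positions where \\d+ appears and extracts the preceding
--     label (identifier). Uses string splitting instead of regex to avoid
--     ReDoS on user input.
--
--     Args:
--         var_name: Pattern like r"system.ruby.l\\d+_cntrl\\d+.stat"
--
--     Returns:
--         List of position labels like ["l", "cntrl"]
--
--     Examples:
--         >>> PatternIndexService.extract_index_positions(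
--         ...     r"system.ruby.l\\d+_cntrl\\d+.stat"
--         ... )
--         ['l', 'cntrl']
--         >>> PatternIndexService.extract_index_positions("system.cpu.ipc")
--         []
--     """
--     cleaned: List[str] = []
--     marker = r"\d+"
--     parts = var_name.split(marker)
--     # Each part (except the last) ends with the label before \d+
--     for part in parts[:-1]:
--         # Extract trailing identifier: letters/underscores before the split
--         label = ""
--         for ch in reversed(part):
--             if ch.isalpha() or ch == "_":
--                 label = ch + label
--             else:
--                 break
--         # Remove leading underscores (e.g., "_cntrl" -> "cntrl")
--         label = label.lstrip("_")
--         if label: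
--             cleaned.append(label)
--
--     return cleaned
-- ===== SOURCE B (Python) =====
-- def extract_index_positions(var_name: str):
--     # Single forward scan: keep the current run of identifier chars; on each
--     # marker occurrence emit the run (minus leading underscores) and skip it.
--     marker = "\\d+"
--     out = []
--     buf = []
--     i = 0
--     n = len(var_name)
--     while i < n:
--         if var_name.startswith(marker, i):
--             label = "".join(buf).lstrip("_")
--             if label:
--                 out.append(label)
--             buf = []
--             i += len(marker)
--         else:
--             ch = var_name[i]
--             if ch.isalpha() or ch == "_":
--                 buf.append(ch)
--             else:
--                 buf = []
--             i += 1
--     return out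
-- ===== Notes on version B (the rewrite author's own statement) =====
-- stated objective: alternative
-- what changed: Replaced split-on-marker followed by a backward scan of each piece with a single forward scan that maintains the current identifier run and emits it at each marker occurrence.
import Mathlib
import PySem

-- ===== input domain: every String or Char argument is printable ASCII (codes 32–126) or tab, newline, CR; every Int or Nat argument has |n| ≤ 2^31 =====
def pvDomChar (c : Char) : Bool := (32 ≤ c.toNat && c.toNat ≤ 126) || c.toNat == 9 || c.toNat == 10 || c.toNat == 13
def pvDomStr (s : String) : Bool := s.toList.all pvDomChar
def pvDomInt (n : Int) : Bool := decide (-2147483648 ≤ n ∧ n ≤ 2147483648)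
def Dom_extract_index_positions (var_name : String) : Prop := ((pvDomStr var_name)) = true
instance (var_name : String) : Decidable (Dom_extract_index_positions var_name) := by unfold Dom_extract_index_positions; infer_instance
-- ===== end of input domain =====

-- B replaces A's split-then-backward-scan with one forward scan (alternative decomposition, same cost).

-- ===== PORT A =====
-- 'for ch in reversed(part): if ch.isalpha() or ch == "_": label = ch + label else: break'
def pvTrailA : List Char → List Char → List Char
  | [], label => label
  | c :: rest, label =>
    if PySem.Chars.isalpha c || c == '_' then pvTrailA rest (c :: label) else label

def extract_index_positions (var_name : String) : List String :=
  let marker : List Char := ['\\', 'd', '+']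
  let parts := PySem.Chars.splitOn var_name.toList marker
  -- parts[:-1] = dropLast; label.lstrip("_") = dropWhile (· == '_') (exact: single strip char)
  (parts.dropLast).foldl
    (fun cleaned part =>
      let label := pvTrailA part.reverse []
      let label := label.dropWhile (· == '_')
      if label ≠ [] then cleaned ++ [String.ofList label] else cleaned)
    []

-- ===== PORT B =====
-- single forward scan; buf is the current identifier run, out the emitted labels
def pvScanB : List Char → List Char → List String → List String
  | [], _, out => out
  | l@(c :: rest), buf, out =>
    if PySem.Chars.startswith l ['\\', 'd', '+'] then
      let label := buf.dropWhile (· == '_')      -- buf.lstrip("_"), exact: single strip char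
      pvScanB (l.drop 3) [] (if label ≠ [] then out ++ [String.ofList label] else out)
    else if PySem.Chars.isalpha c || c == '_' then
      pvScanB rest (buf ++ [c]) out
    else
      pvScanB rest [] out
  termination_by l _ _ => l.length

def extract_index_positions_alt (var_name : String) : List String :=
  pvScanB var_name.toList [] []

-- ===== PRECONDITION & SPEC =====
def Spec_extract_index_positions (var_name : String) (out : List String) : Prop := out = extract_index_positions_alt var_name
instance (var_name : String) (out : List String) : Decidable (Spec_extract_index_positions var_name out) := by unfold Spec_extract_index_positions; infer_instance

-- ===== CLAIM (what is proved, stated in full; the proofs are below) =====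
def Claim_equal_extract_index_positions : Prop := ∀ (var_name : String), Dom_extract_index_positions var_name → Spec_extract_index_positions var_name (extract_index_positions var_name)

-- ===== LEMMAS AND PROOFS =====

def pvIdent (c : Char) : Bool := PySem.Chars.isalpha c || c == '_'

theorem pvTrailA_eq (l acc : List Char) :
    pvTrailA l acc = (l.takeWhile pvIdent).reverse ++ acc := by
  induction l generalizing acc with
  | nil => simp [pvTrailA]
  | cons c rest ih =>
    by_cases h : pvIdent c
    · rw [pvTrailA, if_pos (by simpa [pvIdent] using h), ih,
        List.takeWhile_cons_of_pos h]
      simp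
    · rw [pvTrailA, if_neg (by simpa [pvIdent] using h),
        List.takeWhile_cons_of_neg (by simpa using h)]
      simp

theorem pvGo_acc (sep : List Char) (fuel : Nat) (l cur : List Char) (acc : List (List Char)) :
    PySem.Chars.splitOn.go sep fuel l cur acc
      = acc.reverse ++ PySem.Chars.splitOn.go sep fuel l cur [] := by
  induction fuel generalizing l cur acc with
  | zero => simp [PySem.Chars.splitOn.go]
  | succ fuel ih =>
    cases l with
    | nil => simp [PySem.Chars.splitOn.go]
    | cons c rest =>
      simp only [PySem.Chars.splitOn.go]
      split
      · rw [ih _ _ (cur.reverse :: acc), ih _ _ [cur.reverse]]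
        simp
      · rw [ih rest (c :: cur) acc]

theorem pvGo_ne_nil (sep : List Char) (fuel : Nat) (l cur : List Char) (acc : List (List Char)) :
    PySem.Chars.splitOn.go sep fuel l cur acc ≠ [] := by
  induction fuel generalizing l cur acc with
  | zero => simp [PySem.Chars.splitOn.go]
  | succ fuel ih =>
    cases l with
    | nil => simp [PySem.Chars.splitOn.go]
    | cons c rest =>
      simp only [PySem.Chars.splitOn.go]
      split
      · exact ih _ _ _
      · exact ih _ _ _

-- A's per-part step, as a function of the accumulator
def pvStepA (cleaned : List String) (part : List Char) : List String :=
  let label := pvTrailA part.reverse []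
  let label := label.dropWhile (· == '_')
  if label ≠ [] then cleaned ++ [String.ofList label] else cleaned

theorem pvMain (fuel : Nat) (l cur : List Char) (out : List String)
    (hf : l.length < fuel) :
    pvScanB l ((cur.takeWhile pvIdent).reverse) out
      = ((PySem.Chars.splitOn.go ['\\','d','+'] fuel l cur []).dropLast).foldl pvStepA out := by
  induction fuel generalizing l cur out with
  | zero => omega
  | succ fuel ih =>
    cases l with
    | nil =>
      simp [pvScanB, PySem.Chars.splitOn.go]
    | cons c rest =>
      simp only [PySem.Chars.splitOn.go]
      by_cases hpre : PySem.Chars.startswith (c :: rest) ['\\','d','+']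
      · have hp : List.isPrefixOf ['\\','d','+'] (c :: rest) = true := hpre
        rw [if_pos hp]
        rw [pvGo_acc _ _ _ _ [cur.reverse]]
        have h3 : (['\\','d','+'] : List Char).length = 3 := rfl
        rw [h3]
        have hne := pvGo_ne_nil ['\\','d','+'] fuel (List.drop 3 (c :: rest)) [] []
        rw [show ([cur.reverse].reverse : List (List Char)) ++
              PySem.Chars.splitOn.go ['\\','d','+'] fuel (List.drop 3 (c :: rest)) [] []
            = cur.reverse :: PySem.Chars.splitOn.go ['\\','d','+'] fuel (List.drop 3 (c :: rest)) [] []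
          by simp]
        rw [List.dropLast_cons_of_ne_nil hne, List.foldl_cons]
        rw [pvScanB]
        rw [if_pos hpre]
        have hlen : (List.drop 3 (c :: rest)).length < fuel := by
          simp [List.length_drop] at hf ⊢; omega
        have hgo := ih (List.drop 3 (c :: rest)) [] (pvStepA out cur.reverse) hlen
        simp only [List.takeWhile_nil, List.reverse_nil] at hgo
        dsimp only
        have hout : (if (List.dropWhile (fun x => x == '_')
              ((List.takeWhile pvIdent cur).reverse)) ≠ [] then
              out ++ [String.ofList (List.dropWhile (fun x => x == '_')
                ((List.takeWhile pvIdent cur).reverse))] else out)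
            = pvStepA out cur.reverse := by
          simp only [pvStepA, pvTrailA_eq, List.reverse_reverse, List.append_nil]
        rw [hout]
        exact hgo
      · have hp : List.isPrefixOf ['\\','d','+'] (c :: rest) = false :=
          Bool.eq_false_iff.mpr hpre
        rw [if_neg (by simp [hp])]
        rw [pvScanB, if_neg hpre]
        have hlen : rest.length < fuel := by simp at hf; omega
        by_cases hc : pvIdent c
        · rw [if_pos (by simpa [pvIdent] using hc)]
          have := ih rest (c :: cur) out hlen
          rw [List.takeWhile_cons_of_pos hc] at this
          simpa using this
        · rw [if_neg (by simpa [pvIdent] using hc)]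
          have := ih rest (c :: cur) out hlen
          rw [List.takeWhile_cons_of_neg (by simpa using hc)] at this
          simpa using this

-- ===== VERDICT (by name: the statement is the Claim_ definition above) =====
theorem extract_index_positions_spec : Claim_equal_extract_index_positions := by
  intro var_name _
  have h := pvMain (var_name.toList.length + 1) var_name.toList [] [] (by omega)
  simp only [List.takeWhile_nil, List.reverse_nil] at h
  show extract_index_positions var_name = extract_index_positions_alt var_name
  unfold extract_index_positions extract_index_positions_alt PySem.Chars.splitOn
  exact h.symm
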